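-- pv_equiv track=rewrite | github.com/leejongcheal/baekjoon_course_coding | 기초/시뮬레이션과 구현/16935번 - 배열 돌리기 3.py | oper_6
-- ===== SOURCE A (Python) =====
-- def split_4(Map, N, M):
--     Map1 = [[0]*(M//2) for _ in range(N//2)]
--     Map2 = [[0]*(M//2) for _ in range(N//2)]
--     Map3 = [[0]*(M//2) for _ in range(N//2)]
--     Map4 = [[0]*(M//2) for _ in range(N//2)]
--     for i in range(N):
--         for j in range(M):
--             if 0 <= i < N // 2 and 0 <= j < M // 2:
--                 Map1[i][j] = Map[i][j]
--             elif 0 <= i < N // 2 and M // 2 <= j < M: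
--                 Map2[i][j - M//2] = Map[i][j]
--             elif N // 2 <= i < N and 0 <= j < M // 2:
--                 Map4[i - N//2][j] = Map[i][j]
--             elif N // 2 <= i < N and M // 2 <= j < M:
--                 Map3[i - N//2][j - M//2] = Map[i][j]
--     return Map1, Map2, Map3, Map4
--
-- def oper_6(Map, N, M):
--     Map1, Map2, Map3, Map4 = split_4(Map, N, M)
--     temp = []
--     for i in range(N):
--         if i < N // 2:
--             temp.append(Map2[i] + Map3[i])
--         else:
--             temp.append(Map1[i - N // 2] + Map4[i - N // 2])
--     return temp
-- ===== SOURCE B (Python) =====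
-- def oper_6(Map, N, M):
--     n2, m2 = N // 2, M // 2
--     return [
--         [Map[i][j + m2] if j < m2 else Map[i + n2][j] for j in range(M)]
--         if i < n2 else
--         [Map[i - n2][j] if j < m2 else Map[i][j - m2] for j in range(M)]
--         for i in range(N)
--     ]
-- ===== Notes on version B (the rewrite author's own statement) =====
-- stated objective: simpler
-- what changed: Replaces the split-into-four-matrices pass plus separate concatenation pass by one comprehension that fills each output cell directly from its source index (out[i][j] = Map[i][j+M//2] / Map[i+N//2][j] / Map[i-N//2][j] / Map[i][j-M//2]), dropping the four intermediate quadrant matrices.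
import Mathlib
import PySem

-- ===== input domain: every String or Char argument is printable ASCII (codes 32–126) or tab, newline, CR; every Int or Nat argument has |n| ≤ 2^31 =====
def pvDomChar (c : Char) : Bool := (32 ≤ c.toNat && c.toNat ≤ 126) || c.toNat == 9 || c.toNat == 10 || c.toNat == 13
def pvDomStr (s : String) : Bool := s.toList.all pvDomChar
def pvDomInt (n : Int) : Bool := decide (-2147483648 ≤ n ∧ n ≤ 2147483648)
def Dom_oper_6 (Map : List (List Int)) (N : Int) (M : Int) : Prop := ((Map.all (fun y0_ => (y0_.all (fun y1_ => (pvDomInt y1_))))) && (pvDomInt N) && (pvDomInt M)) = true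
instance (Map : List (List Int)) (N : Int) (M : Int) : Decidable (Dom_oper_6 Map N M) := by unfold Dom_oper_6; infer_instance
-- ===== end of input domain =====

-- B replaces A's split-into-four-quadrant-matrices pass plus a separate concatenation pass by a
-- single comprehension computing each output cell directly from its source index (objective: simpler).

-- ===== PORT A =====
-- Python 'Map[i][j]' read with a default; every use is in range on inputs admitted by Pre_
def pvGet2 (Map : List (List Int)) (i j : Int) : Int :=
  PySem.List.pyGetD (PySem.List.pyGetD Map i []) j 0

-- Python 'l[i][j] = v' (functional: replace row i by its updated copy)
def pvSet2 (l : List (List Int)) (i j : Int) (v : Int) : List (List Int) :=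
  PySem.List.pySetD l i (PySem.List.pySetD (PySem.List.pyGetD l i []) j v)

def split_4 (Map : List (List Int)) (N M : Int) :
    List (List Int) × List (List Int) × List (List Int) × List (List Int) :=
  let n2 := PySem.Int.floordiv N 2
  let m2 := PySem.Int.floordiv M 2
  let z : List (List Int) := (PySem.List.pyRange 0 n2 1).map (fun _ => List.replicate m2.toNat (0:Int))
  (PySem.List.pyRange 0 N 1).foldl (fun s i =>
    (PySem.List.pyRange 0 M 1).foldl (fun s j =>
      if 0 ≤ i ∧ i < n2 ∧ 0 ≤ j ∧ j < m2 then
        (pvSet2 s.1 i j (pvGet2 Map i j), s.2.1, s.2.2.1, s.2.2.2)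
      else if 0 ≤ i ∧ i < n2 ∧ m2 ≤ j ∧ j < M then
        (s.1, pvSet2 s.2.1 i (j - m2) (pvGet2 Map i j), s.2.2.1, s.2.2.2)
      else if n2 ≤ i ∧ i < N ∧ 0 ≤ j ∧ j < m2 then
        (s.1, s.2.1, s.2.2.1, pvSet2 s.2.2.2 (i - n2) j (pvGet2 Map i j))
      else if n2 ≤ i ∧ i < N ∧ m2 ≤ j ∧ j < M then
        (s.1, s.2.1, pvSet2 s.2.2.1 (i - n2) (j - m2) (pvGet2 Map i j), s.2.2.2)
      else s) s) (z, z, z, z)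

def oper_6 (Map : List (List Int)) (N : Int) (M : Int) : List (List Int) :=
  let q := split_4 Map N M
  let n2 := PySem.Int.floordiv N 2
  (PySem.List.pyRange 0 N 1).foldl (fun temp i =>
    if i < n2 then
      temp ++ [PySem.List.pyGetD q.2.1 i [] ++ PySem.List.pyGetD q.2.2.1 i []]
    else
      temp ++ [PySem.List.pyGetD q.1 (i - n2) [] ++ PySem.List.pyGetD q.2.2.2 (i - n2) []]) []

-- ===== PORT B =====
def oper_6_alt (Map : List (List Int)) (N : Int) (M : Int) : List (List Int) :=
  let n2 := PySem.Int.floordiv N 2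
  let m2 := PySem.Int.floordiv M 2
  (PySem.List.pyRange 0 N 1).map (fun i =>
    if i < n2 then
      (PySem.List.pyRange 0 M 1).map (fun j =>
        if j < m2 then pvGet2 Map i (j + m2) else pvGet2 Map (i + n2) j)
    else
      (PySem.List.pyRange 0 M 1).map (fun j =>
        if j < m2 then pvGet2 Map (i - n2) j else pvGet2 Map i (j - m2)))

-- ===== PRECONDITION & SPEC =====
-- Pre_ excludes exactly the inputs on which the Python A raises IndexError: positive odd N or
-- positive odd M (the preallocated quadrant matrices are then too small), or, with both N and M
-- positive, a Map with fewer than N rows or with a row among the first N shorter than M.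
def Pre_oper_6 (Map : List (List Int)) (N : Int) (M : Int) : Prop :=
  N ≤ 0 ∨ (N % 2 = 0 ∧ (M ≤ 0 ∨ (M % 2 = 0 ∧ N ≤ (Map.length : Int) ∧
    ∀ row ∈ Map.take N.toNat, M ≤ (row.length : Int))))
instance (Map : List (List Int)) (N : Int) (M : Int) : Decidable (Pre_oper_6 Map N M) := by
  unfold Pre_oper_6; infer_instance

def pvWitness_oper_6 : List (List Int) × Int × Int := ([[1, 2], [3, 4]], 2, 2)

def Spec_oper_6 (Map : List (List Int)) (N : Int) (M : Int) (out : List (List Int)) : Prop := out = oper_6_alt Map N M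
instance (Map : List (List Int)) (N : Int) (M : Int) (out : List (List Int)) : Decidable (Spec_oper_6 Map N M out) := by unfold Spec_oper_6; infer_instance

-- ===== CLAIM (what is proved, stated in full; the proofs are below) =====
def Claim_equal_oper_6 : Prop := ∀ (Map : List (List Int)) (N : Int) (M : Int), Dom_oper_6 Map N M → Pre_oper_6 Map N M → Spec_oper_6 Map N M (oper_6 Map N M)

-- ===== LEMMAS AND PROOFS =====

lemma fold_set_range (g : Nat → Int) : ∀ (k : Nat) (row : List Int), k ≤ row.length →
    (List.range k).foldl (fun r b => r.set b (g b)) row = (List.range k).map g ++ row.drop k := by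
  intro k
  induction k with
  | zero => simp
  | succ k ih =>
    intro row hk
    rw [List.range_succ, List.foldl_append, ih row (by omega)]
    have hlen : ((List.range k).map g).length = k := by simp
    rw [List.foldl_cons, List.foldl_nil, List.set_append_right _ _ (by simp)]
    rw [List.map_append, List.append_assoc]
    congr 1
    simp only [hlen, Nat.sub_self]
    have hd : row.drop k = row[k] :: row.drop (k+1) := List.drop_eq_getElem_cons (by omega)
    rw [hd, List.set_cons_zero]; simp

lemma fold_pvSet2 (i : Int) (hi : 0 ≤ i) (g h : Int → Int) :
    ∀ (js : List Int) (l : List (List Int)), (∀ j ∈ js, 0 ≤ h j) → i.toNat < l.length →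
    js.foldl (fun l' j => pvSet2 l' i (h j) (g j)) l
      = l.set i.toNat (js.foldl (fun r j => r.set (h j).toNat (g j)) (l.getD i.toNat [])) := by
  intro js
  induction js with
  | nil => intro l _ hl; rw [List.foldl_nil, List.foldl_nil, List.getD_eq_getElem _ _ hl, List.set_getElem_self]
  | cons j js ih =>
    intro l hh hl
    have hhj : 0 ≤ h j := hh j (List.mem_cons_self)
    have hrow : PySem.List.pyGetD l i [] = l.getD i.toNat [] := by
      rw [PySem.List.pyGetD_eq_getElem _ _ hi (by exact_mod_cast by omega)]
      rw [List.getD_eq_getElem _ _ (by omega)]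
    have hgd0 : l.getD i.toNat [] = l[i.toNat] := List.getD_eq_getElem _ _ hl
    have hstep : pvSet2 l i (h j) (g j) = l.set i.toNat (l[i.toNat].set (h j).toNat (g j)) := by
      unfold pvSet2
      rw [PySem.List.pySetD_of_nonneg _ _ hhj, PySem.List.pySetD_of_nonneg _ _ hi, hrow, hgd0]
    rw [List.foldl_cons, hstep, ih _ (fun x hx => hh x (List.mem_cons_of_mem _ hx)) (by simpa using hl)]
    have hgd : (l.set i.toNat (l[i.toNat].set (h j).toNat (g j))).getD i.toNat []
        = l[i.toNat].set (h j).toNat (g j) := by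
      rw [List.getD_eq_getElem _ _ (by simpa using hl)]
      exact List.getElem_set_self (by simpa using hl)
    rw [hgd, List.set_set, hgd0, List.foldl_cons]

def fullRow (Map : List (List Int)) (ro co : Int) (m : Nat) : List Int :=
  (List.range m).map (fun b : Nat => pvGet2 Map ro (co + (b : Int)))

def quadTo (Map : List (List Int)) (ro co : Int) (n m t : Nat) : List (List Int) :=
  (List.range n).map (fun a => if a < t then fullRow Map ((a : Int) + ro) co m else List.replicate m 0)

lemma quadTo_getD (Map : List (List Int)) (ro co : Int) (n m t a : Nat) (ha : a < n) :
    (quadTo Map ro co n m t).getD a [] =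
      if a < t then fullRow Map ((a : Int) + ro) co m else List.replicate m 0 := by
  rw [List.getD_eq_getElem _ _ (by simp [quadTo]; omega)]
  simp [quadTo]

lemma quadTo_set (Map : List (List Int)) (ro co : Int) (n m t : Nat) :
    (quadTo Map ro co n m t).set t (fullRow Map ((t : Int) + ro) co m) = quadTo Map ro co n m (t + 1) := by
  apply List.ext_getElem (by simp [quadTo])
  intro a h1 h2
  have ha : a < n := by simpa [quadTo] using h2
  rw [List.getElem_set]
  simp only [quadTo, List.getElem_map, List.getElem_range]
  split_ifs with e1 e2 e3 <;> first | (subst e1; rfl) | rfl | omega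

def stepA (Map : List (List Int)) (N M n2 m2 i : Int)
    (s : List (List Int) × List (List Int) × List (List Int) × List (List Int)) (j : Int) :
    List (List Int) × List (List Int) × List (List Int) × List (List Int) :=
  if 0 ≤ i ∧ i < n2 ∧ 0 ≤ j ∧ j < m2 then
    (pvSet2 s.1 i j (pvGet2 Map i j), s.2.1, s.2.2.1, s.2.2.2)
  else if 0 ≤ i ∧ i < n2 ∧ m2 ≤ j ∧ j < M then
    (s.1, pvSet2 s.2.1 i (j - m2) (pvGet2 Map i j), s.2.2.1, s.2.2.2)
  else if n2 ≤ i ∧ i < N ∧ 0 ≤ j ∧ j < m2 then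
    (s.1, s.2.1, s.2.2.1, pvSet2 s.2.2.2 (i - n2) j (pvGet2 Map i j))
  else if n2 ≤ i ∧ i < N ∧ m2 ≤ j ∧ j < M then
    (s.1, s.2.1, pvSet2 s.2.2.1 (i - n2) (j - m2) (pvGet2 Map i j), s.2.2.2)
  else s

lemma foldl_upd1 {α β γ δ : Type} (js : List Int) (f : α → Int → α) :
    ∀ (a : α) (b : β) (c : γ) (d : δ),
    js.foldl (fun s j => (f s.1 j, s.2.1, s.2.2.1, s.2.2.2)) (a, b, c, d) = (js.foldl f a, b, c, d) := by
  induction js with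
  | nil => intros; rfl
  | cons x xs ih => intros; exact ih _ _ _ _

lemma foldl_upd2 {α β γ δ : Type} (js : List Int) (f : β → Int → β) :
    ∀ (a : α) (b : β) (c : γ) (d : δ),
    js.foldl (fun s j => (s.1, f s.2.1 j, s.2.2.1, s.2.2.2)) (a, b, c, d) = (a, js.foldl f b, c, d) := by
  induction js with
  | nil => intros; rfl
  | cons x xs ih => intros; exact ih _ _ _ _

-- one filled row: folding the column loop over a not-yet-filled row of quadTo
lemma row_fill (Map : List (List Int)) (i co : Int) (m : Nat) :
    (PySem.List.pyRange co (co + (m : Int)) 1).foldl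
      (fun r j => r.set (j - co).toNat (pvGet2 Map i j)) (List.replicate m 0)
    = fullRow Map i co m := by
  rw [PySem.List.pyRange_one, List.foldl_map]
  simp only [add_sub_cancel_left, Int.toNat_natCast]
  rw [fold_set_range _ m _ (by simp)]
  simp only [List.drop_replicate, Nat.sub_self, List.replicate_zero, List.append_nil]
  rfl

lemma foldl_upd3 {α β γ δ : Type} (js : List Int) (f : γ → Int → γ) :
    ∀ (a : α) (b : β) (c : γ) (d : δ),
    js.foldl (fun s j => (s.1, s.2.1, f s.2.2.1 j, s.2.2.2)) (a, b, c, d) = (a, b, js.foldl f c, d) := by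
  induction js with
  | nil => intros; rfl
  | cons x xs ih => intros; exact ih _ _ _ _

lemma foldl_upd4 {α β γ δ : Type} (js : List Int) (f : δ → Int → δ) :
    ∀ (a : α) (b : β) (c : γ) (d : δ),
    js.foldl (fun s j => (s.1, s.2.1, s.2.2.1, f s.2.2.2 j)) (a, b, c, d) = (a, b, c, js.foldl f d) := by
  induction js with
  | nil => intros; rfl
  | cons x xs ih => intros; exact ih _ _ _ _

lemma inner_top_left (Map : List (List Int)) (n m k : Nat) (hk : k < n)
    (q2 c d : List (List Int)) :
    (PySem.List.pyRange 0 (m : Int) 1).foldl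
      (stepA Map (2 * (n : Int)) (2 * (m : Int)) (n : Int) (m : Int) (k : Int))
      (quadTo Map 0 0 n m k, q2, c, d)
    = (quadTo Map 0 0 n m (k + 1), q2, c, d) := by
  rw [PySem.List.foldl_congr_mem _ _
      (fun s j => (pvSet2 s.1 (k : Int) j (pvGet2 Map (k : Int) j), s.2.1, s.2.2.1, s.2.2.2)) _
      (by
        intro acc x hx
        rw [PySem.List.mem_pyRange_one] at hx
        rw [stepA, if_pos ⟨by positivity, by exact_mod_cast hk, hx.1, by omega⟩])]
  rw [foldl_upd1 _ (fun l' j => pvSet2 l' (k : Int) j (pvGet2 Map (k : Int) j))]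
  congr 1
  have hfold := fold_pvSet2 (k : Int) (by positivity) (fun j => pvGet2 Map (k : Int) j) (fun j => j)
    (PySem.List.pyRange 0 (m : Int) 1) (quadTo Map 0 0 n m k)
    (fun j hj => (PySem.List.mem_pyRange_one.1 hj).1)
    (by simp [quadTo]; omega)
  simp only at hfold
  rw [hfold]
  simp only [Int.toNat_natCast]
  rw [quadTo_getD _ _ _ _ _ _ _ hk, if_neg (by omega)]
  have hlam : (fun (r : List Int) (j : Int) => r.set j.toNat (pvGet2 Map (k : Int) j))
      = (fun (r : List Int) (j : Int) => r.set (j - 0).toNat (pvGet2 Map (k : Int) j)) := by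
    funext r j; simp
  rw [hlam]
  have hr := row_fill Map (k : Int) 0 m
  rw [zero_add] at hr
  rw [hr]
  have : fullRow Map (k : Int) 0 m = fullRow Map ((k : Int) + 0) 0 m := by rw [add_zero]
  rw [this, quadTo_set]

lemma inner_top_right (Map : List (List Int)) (n m k : Nat) (hk : k < n)
    (q1 c d : List (List Int)) :
    (PySem.List.pyRange (m : Int) (2 * (m : Int)) 1).foldl
      (stepA Map (2 * (n : Int)) (2 * (m : Int)) (n : Int) (m : Int) (k : Int))
      (q1, quadTo Map 0 (m : Int) n m k, c, d)
    = (q1, quadTo Map 0 (m : Int) n m (k + 1), c, d) := by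
  rw [PySem.List.foldl_congr_mem _ _
      (fun s j => (s.1, pvSet2 s.2.1 (k : Int) (j - (m : Int)) (pvGet2 Map (k : Int) j), s.2.2.1, s.2.2.2)) _
      (by
        intro acc x hx
        rw [PySem.List.mem_pyRange_one] at hx
        rw [stepA, if_neg (by omega), if_pos ⟨by positivity, by exact_mod_cast hk, hx.1, by omega⟩])]
  rw [foldl_upd2 _ (fun l' j => pvSet2 l' (k : Int) (j - (m : Int)) (pvGet2 Map (k : Int) j))]
  congr 1
  have hfold := fold_pvSet2 (k : Int) (by positivity) (fun j => pvGet2 Map (k : Int) j) (fun j => j - (m : Int))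
    (PySem.List.pyRange (m : Int) (2 * (m : Int)) 1) (quadTo Map 0 (m : Int) n m k)
    (fun j hj => by have := PySem.List.mem_pyRange_one.1 hj; show (0:Int) ≤ j - (m:Int); omega)
    (by simp [quadTo]; omega)
  simp only at hfold
  rw [hfold]
  simp only [Int.toNat_natCast]
  rw [quadTo_getD _ _ _ _ _ _ _ hk, if_neg (by omega)]
  have hr := row_fill Map (k : Int) (m : Int) m
  rw [show ((m : Int) + (m : Int)) = 2 * (m : Int) by ring] at hr
  rw [hr]
  have : fullRow Map (k : Int) (m : Int) m = fullRow Map ((k : Int) + 0) (m : Int) m := by rw [add_zero]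
  rw [this, quadTo_set]

lemma inner_bottom_left (Map : List (List Int)) (n m k : Nat) (hk1 : n ≤ k) (hk2 : k < 2 * n)
    (q1 q2 c : List (List Int)) :
    (PySem.List.pyRange 0 (m : Int) 1).foldl
      (stepA Map (2 * (n : Int)) (2 * (m : Int)) (n : Int) (m : Int) (k : Int))
      (q1, q2, c, quadTo Map (n : Int) 0 n m (k - n))
    = (q1, q2, c, quadTo Map (n : Int) 0 n m (k - n + 1)) := by
  rw [PySem.List.foldl_congr_mem _ _
      (fun s j => (s.1, s.2.1, s.2.2.1, pvSet2 s.2.2.2 ((k : Int) - (n : Int)) j (pvGet2 Map (k : Int) j))) _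
      (by
        intro acc x hx
        rw [PySem.List.mem_pyRange_one] at hx
        rw [stepA, if_neg (by omega), if_neg (by omega),
          if_pos ⟨by exact_mod_cast hk1, by exact_mod_cast hk2, hx.1, by omega⟩])]
  rw [foldl_upd4 _ (fun l' j => pvSet2 l' ((k : Int) - (n : Int)) j (pvGet2 Map (k : Int) j))]
  congr 1
  have hfold := fold_pvSet2 ((k : Int) - (n : Int)) (by omega) (fun j => pvGet2 Map (k : Int) j) (fun j => j)
    (PySem.List.pyRange 0 (m : Int) 1) (quadTo Map (n : Int) 0 n m (k - n))
    (fun j hj => (PySem.List.mem_pyRange_one.1 hj).1)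
    (by simp [quadTo]; omega)
  simp only at hfold
  rw [hfold]
  have htn : ((k : Int) - (n : Int)).toNat = k - n := by omega
  simp only [htn]
  rw [quadTo_getD _ _ _ _ _ _ _ (by omega), if_neg (by omega)]
  have hlam : (fun (r : List Int) (j : Int) => r.set j.toNat (pvGet2 Map (k : Int) j))
      = (fun (r : List Int) (j : Int) => r.set (j - 0).toNat (pvGet2 Map (k : Int) j)) := by
    funext r j; simp
  rw [hlam]
  have hr := row_fill Map (k : Int) 0 m
  rw [zero_add] at hr
  rw [hr]
  have : fullRow Map (k : Int) 0 m = fullRow Map (((k - n : Nat) : Int) + (n : Int)) 0 m := by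
    congr 1; omega
  rw [this, quadTo_set]

lemma inner_bottom_right (Map : List (List Int)) (n m k : Nat) (hk1 : n ≤ k) (hk2 : k < 2 * n)
    (q1 q2 d : List (List Int)) :
    (PySem.List.pyRange (m : Int) (2 * (m : Int)) 1).foldl
      (stepA Map (2 * (n : Int)) (2 * (m : Int)) (n : Int) (m : Int) (k : Int))
      (q1, q2, quadTo Map (n : Int) (m : Int) n m (k - n), d)
    = (q1, q2, quadTo Map (n : Int) (m : Int) n m (k - n + 1), d) := by
  rw [PySem.List.foldl_congr_mem _ _
      (fun s j => (s.1, s.2.1, pvSet2 s.2.2.1 ((k : Int) - (n : Int)) (j - (m : Int)) (pvGet2 Map (k : Int) j), s.2.2.2)) _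
      (by
        intro acc x hx
        rw [PySem.List.mem_pyRange_one] at hx
        rw [stepA, if_neg (by omega), if_neg (by omega), if_neg (by omega),
          if_pos ⟨by exact_mod_cast hk1, by exact_mod_cast hk2, hx.1, by omega⟩])]
  rw [foldl_upd3 _ (fun l' j => pvSet2 l' ((k : Int) - (n : Int)) (j - (m : Int)) (pvGet2 Map (k : Int) j))]
  congr 1
  have hfold := fold_pvSet2 ((k : Int) - (n : Int)) (by omega) (fun j => pvGet2 Map (k : Int) j) (fun j => j - (m : Int))
    (PySem.List.pyRange (m : Int) (2 * (m : Int)) 1) (quadTo Map (n : Int) (m : Int) n m (k - n))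
    (fun j hj => by have := PySem.List.mem_pyRange_one.1 hj; show (0:Int) ≤ j - (m:Int); omega)
    (by simp [quadTo]; omega)
  simp only at hfold
  rw [hfold]
  have htn : ((k : Int) - (n : Int)).toNat = k - n := by omega
  simp only [htn]
  rw [quadTo_getD _ _ _ _ _ _ _ (by omega), if_neg (by omega)]
  have hr := row_fill Map (k : Int) (m : Int) m
  rw [show ((m : Int) + (m : Int)) = 2 * (m : Int) by ring] at hr
  rw [hr]
  have : fullRow Map (k : Int) (m : Int) m = fullRow Map (((k - n : Nat) : Int) + (n : Int)) (m : Int) m := by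
    congr 1; omega
  rw [this, quadTo_set]

lemma inner_all_top (Map : List (List Int)) (n m k : Nat) (hk : k < n) (c d : List (List Int)) :
    (PySem.List.pyRange 0 (2 * (m : Int)) 1).foldl
      (stepA Map (2 * (n : Int)) (2 * (m : Int)) (n : Int) (m : Int) (k : Int))
      (quadTo Map 0 0 n m k, quadTo Map 0 (m : Int) n m k, c, d)
    = (quadTo Map 0 0 n m (k + 1), quadTo Map 0 (m : Int) n m (k + 1), c, d) := by
  rw [PySem.List.pyRange_one_append 0 (m : Int) (2 * (m : Int)) (by positivity) (by omega),
    List.foldl_append, inner_top_left Map n m k hk, inner_top_right Map n m k hk]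

lemma inner_all_bottom (Map : List (List Int)) (n m k : Nat) (hk1 : n ≤ k) (hk2 : k < 2 * n)
    (a b : List (List Int)) :
    (PySem.List.pyRange 0 (2 * (m : Int)) 1).foldl
      (stepA Map (2 * (n : Int)) (2 * (m : Int)) (n : Int) (m : Int) (k : Int))
      (a, b, quadTo Map (n : Int) (m : Int) n m (k - n), quadTo Map (n : Int) 0 n m (k - n))
    = (a, b, quadTo Map (n : Int) (m : Int) n m (k - n + 1), quadTo Map (n : Int) 0 n m (k - n + 1)) := by
  rw [PySem.List.pyRange_one_append 0 (m : Int) (2 * (m : Int)) (by positivity) (by omega),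
    List.foldl_append, inner_bottom_left Map n m k hk1 hk2, inner_bottom_right Map n m k hk1 hk2]

lemma split4_fold (Map : List (List Int)) (n m : Nat) :
    ∀ k : Nat, k ≤ 2 * n →
    (List.range k).foldl (fun s (a : Nat) =>
        (PySem.List.pyRange 0 (2 * (m : Int)) 1).foldl
          (stepA Map (2 * (n : Int)) (2 * (m : Int)) (n : Int) (m : Int) ((a : Int))) s)
      (quadTo Map 0 0 n m 0, quadTo Map 0 (m : Int) n m 0,
       quadTo Map (n : Int) (m : Int) n m 0, quadTo Map (n : Int) 0 n m 0)
    = (quadTo Map 0 0 n m (min k n), quadTo Map 0 (m : Int) n m (min k n),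
       quadTo Map (n : Int) (m : Int) n m (k - n), quadTo Map (n : Int) 0 n m (k - n)) := by
  intro k
  induction k with
  | zero => intro _; simp
  | succ k ih =>
    intro hk
    rw [List.range_succ, List.foldl_append, ih (by omega), List.foldl_cons, List.foldl_nil]
    by_cases hkn : k < n
    · have h1 : min k n = k := by omega
      have h2 : min (k + 1) n = k + 1 := by omega
      have h3 : k - n = 0 := by omega
      have h4 : k + 1 - n = 0 := by omega
      rw [h1, h2, h3, h4, inner_all_top Map n m k hkn]
    · have h1 : min k n = n := by omega
      have h2 : min (k + 1) n = n := by omega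
      have h3 : k + 1 - n = k - n + 1 := by omega
      rw [h1, h2, h3, inner_all_bottom Map n m k (by omega) (by omega)]

lemma split_4_stepA (Map : List (List Int)) (N M : Int) :
    split_4 Map N M =
      (PySem.List.pyRange 0 N 1).foldl (fun s i =>
        (PySem.List.pyRange 0 M 1).foldl
          (stepA Map N M (PySem.Int.floordiv N 2) (PySem.Int.floordiv M 2) i) s)
        ((PySem.List.pyRange 0 (PySem.Int.floordiv N 2) 1).map (fun _ => List.replicate (PySem.Int.floordiv M 2).toNat (0:Int)),
         (PySem.List.pyRange 0 (PySem.Int.floordiv N 2) 1).map (fun _ => List.replicate (PySem.Int.floordiv M 2).toNat (0:Int)),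
         (PySem.List.pyRange 0 (PySem.Int.floordiv N 2) 1).map (fun _ => List.replicate (PySem.Int.floordiv M 2).toNat (0:Int)),
         (PySem.List.pyRange 0 (PySem.Int.floordiv N 2) 1).map (fun _ => List.replicate (PySem.Int.floordiv M 2).toNat (0:Int))) := rfl

lemma quadTo_zero' (Map : List (List Int)) (ro co : Int) (n m : Nat) :
    quadTo Map ro co n m 0 = (List.range n).map (fun _ => List.replicate m (0:Int)) := by
  simp [quadTo]

lemma split_4_main (Map : List (List Int)) (n m : Nat) :
    split_4 Map (2 * (n : Int)) (2 * (m : Int)) =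
      (quadTo Map 0 0 n m n, quadTo Map 0 (m : Int) n m n,
       quadTo Map (n : Int) (m : Int) n m n, quadTo Map (n : Int) 0 n m n) := by
  have hfn : PySem.Int.floordiv (2 * (n : Int)) 2 = (n : Int) := by
    rw [PySem.Int.floordiv_eq_ediv_of_pos (by norm_num)]; omega
  have hfm : PySem.Int.floordiv (2 * (m : Int)) 2 = (m : Int) := by
    rw [PySem.Int.floordiv_eq_ediv_of_pos (by norm_num)]; omega
  rw [split_4_stepA, hfn, hfm]
  have hz : (PySem.List.pyRange 0 (n : Int) 1).map (fun _ => List.replicate ((m : Int)).toNat (0:Int))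
      = (List.range n).map (fun _ => List.replicate m (0:Int)) := by
    rw [PySem.List.pyRange_one, List.map_map]
    simp only [Int.toNat_natCast, Int.sub_zero]
    rfl
  rw [hz]
  have hinit : ((List.range n).map (fun _ => List.replicate m (0:Int)),
      (List.range n).map (fun _ => List.replicate m (0:Int)),
      (List.range n).map (fun _ => List.replicate m (0:Int)),
      (List.range n).map (fun _ => List.replicate m (0:Int)))
      = (quadTo Map 0 0 n m 0, quadTo Map 0 (m : Int) n m 0,
         quadTo Map (n : Int) (m : Int) n m 0, quadTo Map (n : Int) 0 n m 0) := by
    rw [quadTo_zero', quadTo_zero', quadTo_zero', quadTo_zero']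
  rw [hinit]
  rw [PySem.List.pyRange_one 0 (2 * (n : Int)), List.foldl_map]
  have hcast : ((2 * (n : Int) - 0).toNat) = 2 * n := by omega
  rw [hcast]
  have hlam : (fun (s : List (List Int) × List (List Int) × List (List Int) × List (List Int)) (k : Nat) =>
        (PySem.List.pyRange 0 (2 * (m : Int)) 1).foldl
          (stepA Map (2 * (n : Int)) (2 * (m : Int)) (n : Int) (m : Int) (0 + (k : Int))) s)
      = (fun s (k : Nat) =>
        (PySem.List.pyRange 0 (2 * (m : Int)) 1).foldl
          (stepA Map (2 * (n : Int)) (2 * (m : Int)) (n : Int) (m : Int) ((k : Int))) s) := by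
    funext s k; rw [zero_add]
  rw [hlam, split4_fold Map n m (2 * n) (le_refl _)]
  rw [Nat.min_eq_right (by omega)]
  have h2 : 2 * n - n = n := by omega
  rw [h2]

lemma oper_6_eq (Map : List (List Int)) (N M : Int) :
    oper_6 Map N M = (PySem.List.pyRange 0 N 1).foldl (fun temp i =>
      if i < PySem.Int.floordiv N 2 then
        temp ++ [PySem.List.pyGetD (split_4 Map N M).2.1 i [] ++ PySem.List.pyGetD (split_4 Map N M).2.2.1 i []]
      else
        temp ++ [PySem.List.pyGetD (split_4 Map N M).1 (i - PySem.Int.floordiv N 2) [] ++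
          PySem.List.pyGetD (split_4 Map N M).2.2.2 (i - PySem.Int.floordiv N 2) []]) [] := rfl

lemma oper_6_alt_eq (Map : List (List Int)) (N M : Int) :
    oper_6_alt Map N M = (PySem.List.pyRange 0 N 1).map (fun i =>
      if i < PySem.Int.floordiv N 2 then
        (PySem.List.pyRange 0 M 1).map (fun j =>
          if j < PySem.Int.floordiv M 2 then pvGet2 Map i (j + PySem.Int.floordiv M 2)
          else pvGet2 Map (i + PySem.Int.floordiv N 2) j)
      else
        (PySem.List.pyRange 0 M 1).map (fun j =>
          if j < PySem.Int.floordiv M 2 then pvGet2 Map (i - PySem.Int.floordiv N 2) j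
          else pvGet2 Map i (j - PySem.Int.floordiv M 2))) := rfl

lemma foldl_id {α β : Type} (l : List α) (init : β) : l.foldl (fun s _ => s) init = init := by
  induction l generalizing init with
  | nil => rfl
  | cons x xs ih => exact ih _

lemma pyGetD_const_nil {β : Type} (l : List β) (i : Int) :
    PySem.List.pyGetD (l.map (fun _ => ([] : List Int))) i [] = [] := by
  cases h : PySem.List.pyGet? (l.map (fun _ => ([] : List Int))) i with
  | none => exact PySem.List.pyGetD_of_none _ _ _ h
  | some x =>
    have hx : x = [] := (by simpa using PySem.List.mem_of_pyGet?_eq_some _ h : ¬ l = [] ∧ x = []).2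
    subst hx
    simp only [PySem.List.pyGetD, h]
    rfl

lemma quadTo_pyGetD (Map : List (List Int)) (ro co : Int) (n m : Nat) (i : Int)
    (h0 : 0 ≤ i) (h1 : i < (n : Int)) :
    PySem.List.pyGetD (quadTo Map ro co n m n) i [] = fullRow Map (i + ro) co m := by
  rw [PySem.List.pyGetD_eq_getElem _ _ h0 (by simp [quadTo]; omega)]
  simp only [quadTo, List.getElem_map, List.getElem_range]
  rw [if_pos (by omega)]
  congr 1
  omega

lemma pvGet2_congr (Map : List (List Int)) {a b c d : Int} (h1 : a = c) (h2 : b = d) :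
    pvGet2 Map a b = pvGet2 Map c d := by rw [h1, h2]

theorem oper_6_spec_main (Map : List (List Int)) (N M : Int) (hpre : Pre_oper_6 Map N M) :
    oper_6 Map N M = oper_6_alt Map N M := by
  rcases le_or_gt N 0 with hN | hN
  · rw [oper_6_eq, oper_6_alt_eq, PySem.List.pyRange_one_eq_nil hN]; rfl
  rcases le_or_gt M 0 with hM | hM
  · -- M ≤ 0 : every output row is []
    have hMr : PySem.List.pyRange 0 M 1 = [] := PySem.List.pyRange_one_eq_nil hM
    have hm2 : (PySem.Int.floordiv M 2).toNat = 0 := by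
      have := (PySem.Int.floordiv_lt_iff_lt_mul (a := M) (b := 2) (q := 1) (by norm_num)).2 (by omega)
      omega
    have hq : split_4 Map N M =
        ((PySem.List.pyRange 0 (PySem.Int.floordiv N 2) 1).map (fun _ => ([] : List Int)),
         (PySem.List.pyRange 0 (PySem.Int.floordiv N 2) 1).map (fun _ => ([] : List Int)),
         (PySem.List.pyRange 0 (PySem.Int.floordiv N 2) 1).map (fun _ => ([] : List Int)),
         (PySem.List.pyRange 0 (PySem.Int.floordiv N 2) 1).map (fun _ => ([] : List Int))) := by
      rw [split_4_stepA, hMr, hm2]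
      simp only [List.foldl_nil, List.replicate_zero]
      rw [foldl_id]
    rw [oper_6_eq, oper_6_alt_eq, hq, hMr]
    rw [PySem.List.foldl_congr_mem _ _ (fun temp _ => temp ++ [([] : List Int)]) _
      (by intro acc x _; simp only []; split_ifs <;> rw [pyGetD_const_nil] <;> rfl)]
    rw [PySem.List.foldl_append_singleton_eq_map (fun _ => ([] : List Int))]
    simp
  · -- main case: N = 2n > 0, M = 2m > 0
    have hNe : N % 2 = 0 := by
      rcases hpre with h | ⟨h, _⟩ <;> omega
    have hMe : M % 2 = 0 := by
      rcases hpre with h | ⟨_, h | ⟨h, _⟩⟩ <;> omega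
    obtain ⟨n, hn⟩ : ∃ n : Nat, N = 2 * (n : Int) := ⟨(N / 2).toNat, by omega⟩
    obtain ⟨m, hm⟩ : ∃ m : Nat, M = 2 * (m : Int) := ⟨(M / 2).toNat, by omega⟩
    subst hn hm
    have hfn : PySem.Int.floordiv (2 * (n : Int)) 2 = (n : Int) := by
      rw [PySem.Int.floordiv_eq_ediv_of_pos (by norm_num)]; omega
    have hfm : PySem.Int.floordiv (2 * (m : Int)) 2 = (m : Int) := by
      rw [PySem.Int.floordiv_eq_ediv_of_pos (by norm_num)]; omega
    rw [oper_6_eq, oper_6_alt_eq, split_4_main, hfn, hfm]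
    rw [PySem.List.foldl_congr_mem _ _ (fun temp i =>
        temp ++ [if i < (n : Int) then
            PySem.List.pyGetD (quadTo Map 0 (m : Int) n m n) i [] ++
              PySem.List.pyGetD (quadTo Map (n : Int) (m : Int) n m n) i []
          else
            PySem.List.pyGetD (quadTo Map 0 0 n m n) (i - (n : Int)) [] ++
              PySem.List.pyGetD (quadTo Map (n : Int) 0 n m n) (i - (n : Int)) []]) _
      (by intro acc x _; simp only []; split_ifs <;> rfl)]
    rw [PySem.List.foldl_append_singleton_eq_map, List.nil_append]
    apply List.map_congr_left
    intro i hi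
    rw [PySem.List.mem_pyRange_one] at hi
    by_cases hin : i < (n : Int)
    · rw [if_pos hin, if_pos hin]
      rw [quadTo_pyGetD _ _ _ _ _ _ hi.1 hin, quadTo_pyGetD _ _ _ _ _ _ hi.1 hin]
      rw [PySem.List.pyRange_one_append 0 (m : Int) (2 * (m : Int)) (by positivity) (by omega),
        List.map_append]
      congr 1
      · rw [PySem.List.pyRange_one, show ((m : Int) - 0).toNat = m from by omega, List.map_map, fullRow]
        apply List.map_congr_left
        intro b hb
        rw [List.mem_range] at hb
        simp only [Function.comp_apply]
        rw [if_pos (show (0 : Int) + (b : Int) < (m : Int) by omega)]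
        exact pvGet2_congr Map (by omega) (by omega)
      · rw [PySem.List.pyRange_one, show (2 * (m : Int) - (m : Int)).toNat = m from by omega, List.map_map, fullRow]
        apply List.map_congr_left
        intro b hb
        rw [List.mem_range] at hb
        simp only [Function.comp_apply]
        rw [if_neg (show ¬ ((m : Int) + (b : Int) < (m : Int)) by omega)]
    · rw [if_neg hin, if_neg hin]
      rw [quadTo_pyGetD _ _ _ _ _ _ (by omega) (by omega), quadTo_pyGetD _ _ _ _ _ _ (by omega) (by omega)]
      rw [PySem.List.pyRange_one_append 0 (m : Int) (2 * (m : Int)) (by positivity) (by omega),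
        List.map_append]
      congr 1
      · rw [PySem.List.pyRange_one, show ((m : Int) - 0).toNat = m from by omega, List.map_map, fullRow]
        apply List.map_congr_left
        intro b hb
        rw [List.mem_range] at hb
        simp only [Function.comp_apply]
        rw [if_pos (show (0 : Int) + (b : Int) < (m : Int) by omega)]
        exact pvGet2_congr Map (by omega) (by omega)
      · rw [PySem.List.pyRange_one, show (2 * (m : Int) - (m : Int)).toNat = m from by omega, List.map_map, fullRow]
        apply List.map_congr_left
        intro b hb
        rw [List.mem_range] at hb
        simp only [Function.comp_apply]
        rw [if_neg (show ¬ ((m : Int) + (b : Int) < (m : Int)) by omega)]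
        exact pvGet2_congr Map (by omega) (by omega)

-- ===== VERDICT (by name: the statement is the Claim_ definition above) =====
theorem oper_6_spec : Claim_equal_oper_6 := by
  intro Map N M _ hpre
  exact oper_6_spec_main Map N M hpre
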